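-- pv_equiv track=rewrite | github.com/pashatsyganenko/main | 2021-11/bin.py | f
-- ===== SOURCE A (Python) =====
-- k = 564
--
-- def f(n,m):
-- 	if abs(n-m) <= 1:
-- 		return n
-- 	else:
-- 		if ((n+m)//2)**2 > k:
-- 			return f(n,(n+m)//2)
-- 		else:
-- 			return f((n+m)//2,m)
-- ===== SOURCE B (Python) =====
-- k = 564
--
-- def f(n, m):
--     for _ in range(abs(n - m).bit_length()):
--         if abs(n - m) <= 1:
--             break
--         mid = (n + m) // 2
--         if mid * mid > k:
--             m = mid
--         else:
--             n = mid
--     return n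
-- ===== Notes on version B (the rewrite author's own statement) =====
-- stated objective: idiomatic
-- what changed: The tail recursion on (n, m) is rewritten as an iterative bounded for-loop that mutates the local bounds (the gap at least halves each step, so abs(n-m).bit_length() iterations suffice), avoiding Python call-stack recursion.
import Mathlib
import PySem

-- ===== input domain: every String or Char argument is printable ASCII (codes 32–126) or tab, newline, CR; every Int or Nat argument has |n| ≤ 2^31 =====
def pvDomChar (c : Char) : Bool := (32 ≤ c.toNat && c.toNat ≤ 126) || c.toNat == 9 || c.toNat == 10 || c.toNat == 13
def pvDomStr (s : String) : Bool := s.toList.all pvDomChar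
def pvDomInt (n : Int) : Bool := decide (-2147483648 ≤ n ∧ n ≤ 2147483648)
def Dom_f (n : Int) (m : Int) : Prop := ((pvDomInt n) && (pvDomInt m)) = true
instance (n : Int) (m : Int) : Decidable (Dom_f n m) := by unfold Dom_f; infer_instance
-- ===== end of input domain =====

-- B rewrites A's tail recursion as an iterative bounded loop over the local bounds (idiomatic; same cost).


-- ===== PORT A =====
-- module-level constant k = 564
def pvK : Int := 564

-- termination helper for the port's well-founded recursion (cited by name in decreasing_by)
theorem pv_lin_le (a b : Int) (h : 2 ≤ b - a) : a + 1 ≤ b - 1 := by omega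

theorem pv_lin_eq (a b : Int) : a + 1 + (b - 1) = b + a := by omega

theorem pv_mid_lt (n m : Int) (h : ¬ (n - m).natAbs ≤ 1) :
    (n - PySem.Int.floordiv (n + m) 2).natAbs < (n - m).natAbs ∧
    (PySem.Int.floordiv (n + m) 2 - m).natAbs < (n - m).natAbs := by
  have hc2 : (2:Int) ≤ ((n - m).natAbs : Int) := by exact_mod_cast Nat.lt_of_not_le h
  rcases Int.natAbs_eq (n - m) with he | he
  · have h2 : 2 ≤ n - m := by rw [he]; exact hc2
    have hb := PySem.Int.floordiv_two_mid_bounds (lo := m + 1) (hi := n - 1) (pv_lin_le m n h2)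
    rw [pv_lin_eq m n] at hb
    exact ⟨Int.natAbs_lt_natAbs_of_nonneg_of_lt
        (Int.sub_nonneg.mpr (le_trans hb.2 (sub_le_self n zero_le_one)))
        (sub_lt_sub_left (lt_of_lt_of_le (lt_add_one m) hb.1) n),
      Int.natAbs_lt_natAbs_of_nonneg_of_lt
        (Int.sub_nonneg.mpr (le_trans (le_add_of_nonneg_right zero_le_one) hb.1))
        (sub_lt_sub_right (lt_of_le_of_lt hb.2 (sub_one_lt n)) m)⟩
  · have h2 : 2 ≤ m - n := by rw [(neg_sub n m).symm, he, neg_neg]; exact hc2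
    have hb := PySem.Int.floordiv_two_mid_bounds (lo := n + 1) (hi := m - 1) (pv_lin_le n m h2)
    rw [pv_lin_eq n m, Int.add_comm m n] at hb
    constructor
    · rw [← Int.natAbs_neg (n - PySem.Int.floordiv (n + m) 2), neg_sub,
        ← Int.natAbs_neg (n - m), neg_sub]
      exact Int.natAbs_lt_natAbs_of_nonneg_of_lt
        (Int.sub_nonneg.mpr (le_trans (le_add_of_nonneg_right zero_le_one) hb.1))
        (sub_lt_sub_right (lt_of_le_of_lt hb.2 (sub_one_lt m)) n)
    · rw [← Int.natAbs_neg (PySem.Int.floordiv (n + m) 2 - m), neg_sub,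
        ← Int.natAbs_neg (n - m), neg_sub]
      exact Int.natAbs_lt_natAbs_of_nonneg_of_lt
        (Int.sub_nonneg.mpr (le_trans hb.2 (sub_le_self m zero_le_one)))
        (sub_lt_sub_left (lt_of_lt_of_le (lt_add_one n) hb.1) m)

def f (n : Int) (m : Int) : Int :=
  if (n - m).natAbs ≤ 1 then n
  else
    if (PySem.Int.floordiv (n + m) 2) ^ 2 > pvK then
      f n (PySem.Int.floordiv (n + m) 2)
    else
      f (PySem.Int.floordiv (n + m) 2) m
termination_by (n - m).natAbs
decreasing_by
  · exact (pv_mid_lt n m ‹_›).1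
  · exact (pv_mid_lt n m ‹_›).2

-- ===== PORT B =====
-- the for-loop of Source B: fuel = remaining iterations of 'range(abs(n-m).bit_length())';
-- the 'if abs(n-m) <= 1: break' is the first branch, the loop body mutates (n, m)
def f_alt_loop : Nat → Int → Int → Int × Int
  | 0, n, m => (n, m)
  | fuel + 1, n, m =>
    if (n - m).natAbs ≤ 1 then (n, m)
    else
      let mid := PySem.Int.floordiv (n + m) 2
      if mid * mid > pvK then f_alt_loop fuel n mid
      else f_alt_loop fuel mid m

def f_alt (n : Int) (m : Int) : Int :=
  (f_alt_loop (PySem.Int.bitLength |n - m|) n m).1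

-- ===== PRECONDITION & SPEC =====
def Spec_f (n : Int) (m : Int) (out : Int) : Prop := out = f_alt n m
instance (n : Int) (m : Int) (out : Int) : Decidable (Spec_f n m out) := by unfold Spec_f; infer_instance

-- ===== CLAIM (what is proved, stated in full; the proofs are below) =====
def Claim_equal_f : Prop := ∀ (n : Int) (m : Int), Dom_f n m → Spec_f n m (f n m)

-- ===== LEMMAS AND PROOFS =====
theorem f_alt_loop_correct (fuel : Nat) : ∀ (n m : Int),
    (n - m).natAbs ≤ 2 ^ fuel → (f_alt_loop fuel n m).1 = f n m := by
  induction fuel with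
  | zero =>
    intro n m h
    rw [f]
    simp at h
    rw [if_pos h]
    rfl
  | succ fuel ih =>
    intro n m h
    rw [f, f_alt_loop]
    by_cases h1 : (n - m).natAbs ≤ 1
    · rw [if_pos h1, if_pos h1]
    · rw [if_neg h1, if_neg h1]
      simp only [pow_two]
      have hgap : ∀ a b : Int, a = PySem.Int.floordiv (n + m) 2 ∧ b = m ∨
          a = n ∧ b = PySem.Int.floordiv (n + m) 2 → (a - b).natAbs ≤ 2 ^ fuel := by
        intro a b hab
        rw [PySem.Int.floordiv_eq_ediv_of_pos (by norm_num : (0:Int) < 2)] at hab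
        have he := Int.emod_add_ediv (n + m) 2
        have h1e := Int.emod_nonneg (n + m) (by norm_num : (2:Int) ≠ 0)
        have h2e := Int.emod_lt_of_pos (n + m) (by norm_num : (0:Int) < 2)
        have hp : (2:Nat) ^ (fuel + 1) = 2 ^ fuel + 2 ^ fuel := by ring
        rw [hp] at h
        rcases hab with ⟨ha, hb⟩ | ⟨ha, hb⟩ <;> subst ha <;> subst hb <;> omega
      split
      · exact ih n _ (hgap _ _ (Or.inr ⟨rfl, rfl⟩))
      · exact ih _ m (hgap _ _ (Or.inl ⟨rfl, rfl⟩))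

-- ===== VERDICT (by name: the statement is the Claim_ definition above) =====
theorem f_spec : Claim_equal_f := by
  intro n m _
  unfold Spec_f f_alt
  refine (f_alt_loop_correct _ n m ?_).symm
  have h := PySem.Int.lt_two_pow_bitLength |n - m|
  have : (|n - m|).natAbs = (n - m).natAbs := by
    rcases abs_cases (n - m) with ⟨h1, _⟩ | ⟨h1, _⟩ <;> omega
  omega
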